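-- pv_equiv track=rewrite | github.com/chenxi-v/longTV | backend/app/tvbox_parser.py | _parse_text_config
-- ===== SOURCE A (Python) =====
-- from typing import Dict, Any, List
--
-- def _parse_text_config(content: str) -> Dict[str, Any]:
--     """
--     解析文本格式的配置
--     :param content: 配置内容
--     :return: 解析后的配置字典
--     """
--     config = {"sites": []}
--
--     lines = content.split('\n')
--     current_site = None
--
--     for line in lines:
--         line = line.strip()
--         if not line or line.startswith('#'):
--             continue
--
--         if '=' in line:
--             key, value = line.split('=', 1)
--             key = key.strip()
--             value = value.strip()
--
--             if key.lower() == 'name':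
--                 # 新站点开始
--                 if current_site is not None:
--                     config["sites"].append(current_site)
--                 current_site = {"key": value, "name": value}
--             elif current_site is not None:
--                 current_site[key.lower()] = value
--
--     if current_site is not None:
--         config["sites"].append(current_site)
--
--     return config
-- ===== SOURCE B (Python) =====
-- def _parse_text_config(content: str):
--     # Pass 1: clean lines into (key_lower, value) tokens.
--     tokens = []
--     for raw in content.split('\n'):
--         line = raw.strip()
--         if not line or line.startswith('#') or '=' not in line:
--             continue
--         k, v = line.split('=', 1)
--         tokens.append((k.strip().lower(), v.strip()))
--     # Pass 2: segment tokens into groups, one per 'name' token (pre-name tokens dropped).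
--     groups = []
--     for tok in tokens:
--         if tok[0] == 'name':
--             groups.append([tok])
--         elif groups:
--             groups[-1].append(tok)
--     # Pass 3: materialise each group into a site dict.
--     sites = []
--     for group in groups:
--         name = group[0][1]
--         site = {"key": name, "name": name}
--         for k, v in group[1:]:
--             site[k] = v
--         sites.append(site)
--     return {"sites": sites}
-- ===== Notes on version B (the rewrite author's own statement) =====
-- stated objective: alternative
-- what changed: Replaces A's single streaming loop with an Optional current-site accumulator by a three-phase pipeline: tokenize lines into (key_lower, value) pairs, segment tokens into groups starting at each 'name' token, then materialise each group into a site dict.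
import Mathlib
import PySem

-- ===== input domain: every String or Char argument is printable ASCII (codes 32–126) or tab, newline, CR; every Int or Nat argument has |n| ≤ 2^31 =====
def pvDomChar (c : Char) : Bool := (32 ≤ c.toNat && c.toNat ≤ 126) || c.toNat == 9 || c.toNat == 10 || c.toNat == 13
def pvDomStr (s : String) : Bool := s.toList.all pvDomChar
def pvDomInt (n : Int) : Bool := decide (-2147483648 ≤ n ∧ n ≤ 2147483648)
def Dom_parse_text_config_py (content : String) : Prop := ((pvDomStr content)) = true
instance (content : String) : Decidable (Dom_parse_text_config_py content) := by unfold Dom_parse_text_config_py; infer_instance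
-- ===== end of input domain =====

-- B replaces A's single streaming loop (with an Optional current-site accumulator) by a
-- three-phase pipeline: tokenize, segment tokens into groups at each 'name' token, then
-- materialise each group into a site dict (objective: alternative decomposition).

-- ===== PORT A =====
-- one iteration of A's `for line in lines` loop; state = (config["sites"], current_site)
def pvAStep (st : List (PySem.Dict String String) × Option (PySem.Dict String String))
    (rawLine : String) : List (PySem.Dict String String) × Option (PySem.Dict String String) :=
  let line := PySem.Str.strip rawLine
  if PySem.Str.len line == 0 || PySem.Str.startswith line "#" then st
  else if PySem.Str.isIn "=" line then
    match PySem.Str.splitMax? line "=" 1 with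
    | some [key, value] =>
      let key := PySem.Str.strip key
      let value := PySem.Str.strip value
      if PySem.Str.lower key == "name" then
        (match st.2 with
         | some cur => st.1 ++ [cur]
         | none => st.1,
         some (PySem.Dict.ofList [("key", value), ("name", value)]))
      else
        match st.2 with
        | some cur => (st.1, some (cur.insert (PySem.Str.lower key) value))
        | none => st
    | _ => st   -- unreachable: '=' ∈ line gives exactly two pieces
  else st

def parse_text_config_py (content : String) : List (String × List (List (String × String))) :=
  -- split? is some for the nonempty separator "\n"; getD is never the fallback
  let st := ((PySem.Str.split? content "\n").getD []).foldl pvAStep ([], none)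
  let sites := match st.2 with
    | some cur => st.1 ++ [cur]
    | none => st.1
  [("sites", sites.map (fun d => d.items))]

-- ===== PORT B =====
-- phase 1: clean lines into (key_lower, value) tokens
def pvBTokStep (acc : List (String × String)) (rawLine : String) : List (String × String) :=
  let line := PySem.Str.strip rawLine
  if PySem.Str.len line == 0 || PySem.Str.startswith line "#" || !PySem.Str.isIn "=" line then acc
  else
    match PySem.Str.splitMax? line "=" 1 with
    | some [k, v] => acc ++ [(PySem.Str.lower (PySem.Str.strip k), PySem.Str.strip v)]
    | _ => acc

-- phase 2: segment tokens into groups, one per 'name' token (pre-name tokens dropped)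
def pvBGroupStep (gs : List (List (String × String))) (tok : String × String) :
    List (List (String × String)) :=
  if tok.1 == "name" then gs ++ [[tok]]
  else
    match gs with
    | [] => gs
    | _ :: _ => gs.dropLast ++ [gs.getLast! ++ [tok]]

-- phase 3: materialise one group into a site dict (its items)
def pvBSite (group : List (String × String)) : List (String × String) :=
  match group with
  | (_, name) :: rest =>
    (rest.foldl (fun d t => d.insert t.1 t.2)
      (PySem.Dict.ofList [("key", name), ("name", name)])).items
  | [] => []

def parse_text_config_py_alt (content : String) : List (String × List (List (String × String))) :=
  let tokens := ((PySem.Str.split? content "\n").getD []).foldl pvBTokStep []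
  let groups := tokens.foldl pvBGroupStep []
  [("sites", groups.map pvBSite)]

-- ===== PRECONDITION & SPEC =====
def Spec_parse_text_config_py (content : String) (out : List (String × List (List (String × String)))) : Prop := out = parse_text_config_py_alt content
instance (content : String) (out : List (String × List (List (String × String)))) : Decidable (Spec_parse_text_config_py content out) := by unfold Spec_parse_text_config_py; infer_instance

-- ===== CLAIM (what is proved, stated in full; the proofs are below) =====
def Claim_equal_parse_text_config_py : Prop := ∀ (content : String), Dom_parse_text_config_py content → Spec_parse_text_config_py content (parse_text_config_py content)

-- ===== LEMMAS AND PROOFS =====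

-- shared token extraction of one raw line
def pvLineTok (rawLine : String) : Option (String × String) :=
  let line := PySem.Str.strip rawLine
  if PySem.Str.len line == 0 || PySem.Str.startswith line "#" then none
  else if PySem.Str.isIn "=" line then
    match PySem.Str.splitMax? line "=" 1 with
    | some [k, v] => some (PySem.Str.lower (PySem.Str.strip k), PySem.Str.strip v)
    | _ => none
  else none

-- A's loop restricted to tokens
def pvATok (st : List (PySem.Dict String String) × Option (PySem.Dict String String))
    (t : String × String) : List (PySem.Dict String String) × Option (PySem.Dict String String) :=
  if t.1 == "name" then
    (match st.2 with
     | some cur => st.1 ++ [cur]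
     | none => st.1,
     some (PySem.Dict.ofList [("key", t.2), ("name", t.2)]))
  else
    match st.2 with
    | some cur => (st.1, some (cur.insert t.1 t.2))
    | none => st

-- the common specification: completed sites from a current site and remaining tokens
def pvSitesOf (cur : Option (PySem.Dict String String)) (ts : List (String × String)) :
    List (PySem.Dict String String) :=
  match ts with
  | [] => (match cur with | some d => [d] | none => [])
  | t :: ts' =>
    if t.1 == "name" then
      (match cur with | some d => [d] | none => []) ++
        pvSitesOf (some (PySem.Dict.ofList [("key", t.2), ("name", t.2)])) ts'
    else
      match cur with
      | some d => pvSitesOf (some (d.insert t.1 t.2)) ts'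
      | none => pvSitesOf none ts'

theorem pvAStep_eq (st : List (PySem.Dict String String) × Option (PySem.Dict String String))
    (line : String) :
    pvAStep st line = match pvLineTok line with
      | none => st
      | some t => pvATok st t := by
  simp only [pvAStep, pvLineTok, pvATok]
  by_cases ha : (PySem.Str.len (PySem.Str.strip line) == 0
      || PySem.Str.startswith (PySem.Str.strip line) "#") = true
  · simp at ha
    simp [ha]
  · by_cases hc : PySem.Str.isIn "=" (PySem.Str.strip line) = true
    · rcases hsp : PySem.Str.splitMax? (PySem.Str.strip line) "=" 1 with _ | ⟨_ | ⟨k, _ | ⟨v, _ | _⟩⟩⟩ <;>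
        · simp at ha hc
          simp [ha, hc]
    · simp at ha hc
      simp [ha, hc]

theorem pvBTokStep_eq (acc : List (String × String)) (line : String) :
    pvBTokStep acc line = match pvLineTok line with
      | none => acc
      | some t => acc ++ [t] := by
  simp only [pvBTokStep, pvLineTok]
  by_cases ha : (PySem.Str.len (PySem.Str.strip line) == 0) = true
  · simp at ha
    simp [ha]
  · by_cases hb : PySem.Str.startswith (PySem.Str.strip line) "#" = true
    · simp at ha hb
      simp [hb]
    · by_cases hc : PySem.Str.isIn "=" (PySem.Str.strip line) = true
      · rcases hsp : PySem.Str.splitMax? (PySem.Str.strip line) "=" 1 with _ | ⟨_ | ⟨k, _ | ⟨v, _ | _⟩⟩⟩ <;>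
          · simp at ha hb hc
            simp [ha, hb, hc]
      · simp at ha hb hc
        simp [ha, hb, hc]

theorem pvTok_fold (lines : List String) (acc : List (String × String)) :
    lines.foldl pvBTokStep acc = acc ++ lines.filterMap pvLineTok := by
  induction lines generalizing acc with
  | nil => simp
  | cons l ls ih =>
    simp only [List.foldl_cons, List.filterMap_cons, pvBTokStep_eq]
    cases pvLineTok l <;> simp [ih]

theorem pvAStep_fold (lines : List String)
    (st : List (PySem.Dict String String) × Option (PySem.Dict String String)) :
    lines.foldl pvAStep st = (lines.filterMap pvLineTok).foldl pvATok st := by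
  induction lines generalizing st with
  | nil => rfl
  | cons l ls ih =>
    simp only [List.foldl_cons, List.filterMap_cons, pvAStep_eq]
    cases pvLineTok l <;> simp [ih]

-- A's fold computes pvSitesOf
theorem pvA_sites (ts : List (String × String))
    (S : List (PySem.Dict String String)) (cur : Option (PySem.Dict String String)) :
    (match (ts.foldl pvATok (S, cur)).2 with
      | some d => (ts.foldl pvATok (S, cur)).1 ++ [d]
      | none => (ts.foldl pvATok (S, cur)).1) = S ++ pvSitesOf cur ts := by
  induction ts generalizing S cur with
  | nil => cases cur <;> simp [pvSitesOf]
  | cons t ts' ih =>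
    simp only [List.foldl_cons]
    by_cases h : (t.1 == "name") = true
    · cases cur <;> simp [pvSitesOf, pvATok, h, ih]
    · cases cur <;> simp [pvSitesOf, pvATok, h, ih]

-- B's group step commutes with a fixed prefix (the tail list stays nonempty)
theorem pvBGroupStep_append (gs gs' : List (List (String × String))) (t : String × String)
    (h : gs' ≠ []) : pvBGroupStep (gs ++ gs') t = gs ++ pvBGroupStep gs' t := by
  obtain ⟨ys, z, rfl⟩ : ∃ ys z, gs' = ys ++ [z] :=
    ⟨gs'.dropLast, gs'.getLast h, (List.dropLast_append_getLast h).symm⟩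
  by_cases hn : (t.1 == "name") = true
  · simp [pvBGroupStep, hn]
  · rcases hgs : gs ++ (ys ++ [z]) with _ | ⟨x, xs⟩
    · simp at hgs
    · rcases hys : ys ++ [z] with _ | ⟨y, ws⟩
      · simp at hys
      · simp only [pvBGroupStep, hn, Bool.false_eq_true, if_false]
        rw [← hgs, ← hys]
        simp [← List.append_assoc]

theorem pvBGroupStep_ne_nil (gs : List (List (String × String))) (t : String × String)
    (h : gs ≠ []) : pvBGroupStep gs t ≠ [] := by
  rcases gs with _ | ⟨x, xs⟩
  · exact absurd rfl h
  · by_cases hn : (t.1 == "name") = true <;> simp [pvBGroupStep, hn]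

theorem pvBGroup_fold_append (ts : List (String × String))
    (gs gs' : List (List (String × String))) (h : gs' ≠ []) :
    ts.foldl pvBGroupStep (gs ++ gs') = gs ++ ts.foldl pvBGroupStep gs' := by
  induction ts generalizing gs' with
  | nil => rfl
  | cons t ts' ih =>
    simp only [List.foldl_cons, pvBGroupStep_append gs gs' t h]
    exact ih (pvBGroupStep gs' t) (pvBGroupStep_ne_nil gs' t h)

-- B's group fold from a single open group computes pvSitesOf
theorem pvB_sites_open (ts : List (String × String)) (k n : String)
    (rest : List (String × String)) :
    (ts.foldl pvBGroupStep [(k, n) :: rest]).map pvBSite =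
      (pvSitesOf (some (rest.foldl (fun d p => d.insert p.1 p.2)
        (PySem.Dict.ofList [("key", n), ("name", n)]))) ts).map (fun d => d.items) := by
  induction ts generalizing k n rest with
  | nil => simp [pvSitesOf, pvBSite]
  | cons t ts' ih =>
    simp only [List.foldl_cons, pvSitesOf]
    by_cases h : (t.1 == "name") = true
    · have hstep : pvBGroupStep [(k, n) :: rest] t = [(k, n) :: rest] ++ [[t]] := by
        simp [pvBGroupStep, h]
      rw [hstep, pvBGroup_fold_append ts' [(k, n) :: rest] [[t]] (by simp)]
      have ht : (t.1, t.2) = t := rfl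
      have h2 := ih t.1 t.2 []
      simp only [List.foldl_nil, ht] at h2
      simp [h, h2, pvBSite]
    · have hstep : pvBGroupStep [(k, n) :: rest] t = [((k, n) :: rest) ++ [t]] := by
        simp [pvBGroupStep, h]
      rw [hstep]
      simp only [h, Bool.false_eq_true, if_false]
      have h2 := ih k n (rest ++ [t])
      simp only [List.cons_append] at h2 ⊢
      rw [h2]
      simp

-- B's group fold from the empty group list computes pvSitesOf none
theorem pvB_sites (ts : List (String × String)) :
    (ts.foldl pvBGroupStep []).map pvBSite =
      (pvSitesOf none ts).map (fun d => d.items) := by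
  induction ts with
  | nil => rfl
  | cons t ts' ih =>
    simp only [List.foldl_cons, pvSitesOf]
    by_cases h : (t.1 == "name") = true
    · have hstep : pvBGroupStep [] t = [[t]] := by simp [pvBGroupStep, h]
      rw [hstep]
      have ht : (t.1, t.2) = t := rfl
      have h2 := pvB_sites_open ts' t.1 t.2 []
      simp only [List.foldl_nil, ht] at h2
      simp [h, h2]
    · have hstep : pvBGroupStep [] t = [] := by simp [pvBGroupStep, h]
      rw [hstep]
      simp [h, ih]

-- ===== VERDICT (by name: the statement is the Claim_ definition above) =====
theorem parse_text_config_py_spec : Claim_equal_parse_text_config_py := by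
  intro content _
  unfold Spec_parse_text_config_py parse_text_config_py parse_text_config_py_alt
  rw [pvTok_fold, pvAStep_fold]
  simp only [List.nil_append]
  rw [pvB_sites]
  have h := pvA_sites (((PySem.Str.split? content "\n").getD []).filterMap pvLineTok) [] none
  simp only [List.nil_append] at h
  rw [h]
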